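-- pv_equiv track=rewrite | github.com/sashu1999/dialytis | calculator.py | math_expression_generator
-- ===== SOURCE A (Python) =====
-- def math_expression_generator(arr):
--     op = {
--         10,  # = "/"
--         11,  # = "+"
--         12,  # = "-"
--         13  # = "*"
--     }
--
--     m_exp = []
--     temp = []
--
--     'creating a list separating all elements'
--     for item in arr:
--         if item not in op:
--             temp.append(item)
--         else:
--             m_exp.append(temp)
--             m_exp.append(item)
--             temp = []
--     if temp:
--         m_exp.append(temp)
--
--     'converting the elements to numbers and operators'
--     i = 0
--     num = 0
--     for item in m_exp:
--         if type(item) == list: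
--             if not item:
--                 m_exp[i] = ""
--                 i = i + 1
--             else:
--                 num_len = len(item)
--                 for digit in item:
--                     num_len = num_len - 1
--                     num = num + ((10 ** num_len) * digit)
--                 m_exp[i] = str(num)
--                 num = 0
--                 i = i + 1
--         else:
--             m_exp[i] = str(item)
--             m_exp[i] = m_exp[i].replace("10", "/")
--             m_exp[i] = m_exp[i].replace("11", "+")
--             m_exp[i] = m_exp[i].replace("12", "-")
--             m_exp[i] = m_exp[i].replace("13", "*")
--
--             i = i + 1
--
--     'joining the list of strings to create the mathematical expression'
--     separator = ' '
--     m_exp_str = separator.join(m_exp)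
--
--     return (m_exp_str)
-- ===== SOURCE B (Python) =====
-- def math_expression_generator(arr):
--     sym = {10: "/", 11: "+", 12: "-", 13: "*"}
--     out = []
--     cur = []
--     for t in arr:
--         if t in sym:
--             n = 0
--             for d in cur:
--                 n = n * 10 + d
--             out.append("" if not cur else str(n))
--             out.append(sym[t])
--             cur = []
--         else:
--             cur.append(t)
--     if cur:
--         n = 0
--         for d in cur:
--             n = n * 10 + d
--         out.append(str(n))
--     return " ".join(out)
-- ===== Notes on version B (the rewrite author's own statement) =====
-- stated objective: faster
-- what changed: Single pass with a string output list and a digit buffer (operator symbols via a dict, number value via Horner accumulation n = n*10 + d) instead of A's two passes that first build a mixed list of digit-sublists and operator ints and then rewrite it in place using 10**num_len positional powers and four str.replace calls.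
import Mathlib
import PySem

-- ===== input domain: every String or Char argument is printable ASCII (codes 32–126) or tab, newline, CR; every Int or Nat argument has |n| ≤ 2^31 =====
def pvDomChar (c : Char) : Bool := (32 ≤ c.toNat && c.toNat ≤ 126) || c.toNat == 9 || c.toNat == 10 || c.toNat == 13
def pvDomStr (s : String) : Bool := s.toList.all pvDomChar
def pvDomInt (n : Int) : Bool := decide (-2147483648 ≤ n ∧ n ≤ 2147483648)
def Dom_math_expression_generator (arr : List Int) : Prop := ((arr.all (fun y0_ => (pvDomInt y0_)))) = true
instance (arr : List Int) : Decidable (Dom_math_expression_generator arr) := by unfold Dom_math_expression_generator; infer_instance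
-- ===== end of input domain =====

-- B: single pass with a string output list and a digit buffer (Horner accumulation, operator dict)
-- instead of A's two passes (mixed list build + in-place rewrite with 10**k arithmetic and str.replace).


-- ===== PORT A =====
-- A's first loop: split arr into digit-sublists (Sum.inl) and operator tokens (Sum.inr)
def pvOps : List Int := [10, 11, 12, 13]

def pvStep1 (st : List (List Int ⊕ Int) × List Int) (item : Int) :
    List (List Int ⊕ Int) × List Int :=
  if item ∈ pvOps then (st.1 ++ [Sum.inl st.2, Sum.inr item], [])
  else (st.1, st.2 ++ [item])

-- A's inner digit loop: num_len -= 1; num += (10 ** num_len) * digit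
def pvDigitStep (p : Int × Nat) (digit : Int) : Int × Nat :=
  (p.1 + (10 : Int) ^ (p.2 - 1) * digit, p.2 - 1)

-- A's operator conversion: str(item) then the four .replace calls
def pvOpStr (o : Int) : String :=
  PySem.Str.replace
    (PySem.Str.replace
      (PySem.Str.replace
        (PySem.Str.replace (PySem.Int.toStr o) "10" "/") "11" "+") "12" "-") "13" "*"

-- A's second loop over m_exp, carrying (strings so far, num)
def pvStep2 (st : List String × Int) (item : List Int ⊕ Int) : List String × Int :=
  match item with
  | Sum.inl l =>
    if l = [] then (st.1 ++ [""], st.2)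
    else (st.1 ++ [PySem.Int.toStr (l.foldl pvDigitStep (st.2, l.length)).1], 0)
  | Sum.inr o => (st.1 ++ [pvOpStr o], st.2)

def math_expression_generator (arr : List Int) : String :=
  let s := arr.foldl pvStep1 ([], [])
  let m_exp := if s.2 ≠ [] then s.1 ++ [Sum.inl s.2] else s.1
  PySem.Str.join " " (m_exp.foldl pvStep2 ([], 0)).1

-- ===== PORT B =====
def pvSym : PySem.Dict Int String := PySem.Dict.ofList [(10, "/"), (11, "+"), (12, "-"), (13, "*")]

-- n = 0; for d in cur: n = n*10 + d
def pvHorner (l : List Int) : Int := l.foldl (fun n d => n * 10 + d) 0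

def pvNumStr (l : List Int) : String := if l = [] then "" else PySem.Int.toStr (pvHorner l)

def pvStepB (st : List String × List Int) (t : Int) : List String × List Int :=
  match PySem.Dict.get? pvSym t with
  | some s => (st.1 ++ [pvNumStr st.2, s], [])
  | none => (st.1, st.2 ++ [t])

def math_expression_generator_alt (arr : List Int) : String :=
  let st := arr.foldl pvStepB ([], [])
  let out := if st.2 ≠ [] then st.1 ++ [PySem.Int.toStr (pvHorner st.2)] else st.1
  PySem.Str.join " " out

-- ===== PRECONDITION & SPEC =====
def Spec_math_expression_generator (arr : List Int) (out : String) : Prop := out = math_expression_generator_alt arr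
instance (arr : List Int) (out : String) : Decidable (Spec_math_expression_generator arr out) := by unfold Spec_math_expression_generator; infer_instance

-- ===== CLAIM (what is proved, stated in full; the proofs are below) =====
def Claim_equal_math_expression_generator : Prop := ∀ (arr : List Int), Dom_math_expression_generator arr → Spec_math_expression_generator arr (math_expression_generator arr)

-- ===== LEMMAS AND PROOFS =====

-- B's string for one item of A's mixed list
def pvRender1 : List Int ⊕ Int → String
  | Sum.inl l => pvNumStr l
  | Sum.inr o => pvOpStr o

theorem pvHorner_aux (l : List Int) (a : Int) :
    l.foldl (fun n d => n * 10 + d) a = a * 10 ^ l.length + pvHorner l := by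
  induction l generalizing a with
  | nil => simp [pvHorner]
  | cons d l ih =>
    simp only [List.foldl_cons, List.length_cons]
    rw [ih]
    have hd : pvHorner (d :: l) = d * 10 ^ l.length + pvHorner l := by
      simp only [pvHorner, List.foldl_cons]
      rw [show (0 : Int) * 10 + d = d from by ring, ih]; simp [pvHorner]
    rw [hd]; ring

theorem pvHorner_cons (d : Int) (l : List Int) :
    pvHorner (d :: l) = d * 10 ^ l.length + pvHorner l := by
  simp only [pvHorner, List.foldl_cons]
  rw [show (0 : Int) * 10 + d = d from by ring, pvHorner_aux]; simp [pvHorner]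

theorem pvDigitFold (l : List Int) (n : Int) :
    l.foldl pvDigitStep (n, l.length) = (n + pvHorner l, 0) := by
  induction l generalizing n with
  | nil => simp [pvHorner]
  | cons d l ih =>
    simp only [List.foldl_cons, List.length_cons, pvDigitStep, Nat.add_sub_cancel]
    rw [ih, pvHorner_cons]
    ring_nf

theorem pvStep2_fold (ms : List (List Int ⊕ Int)) (strs : List String) :
    ms.foldl pvStep2 (strs, 0) = (strs ++ ms.map pvRender1, 0) := by
  induction ms generalizing strs with
  | nil => simp
  | cons item ms ih =>
    cases item with
    | inl l =>
      by_cases hl : l = []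
      · subst hl
        rw [List.foldl_cons, show pvStep2 (strs, 0) (Sum.inl []) = (strs ++ [""], 0) from rfl, ih]
        simp [pvRender1, pvNumStr]
      · simp only [List.foldl_cons, pvStep2, if_neg hl]
        rw [pvDigitFold, ih]
        simp [pvRender1, pvNumStr, hl]
    | inr o =>
      simp only [List.foldl_cons, pvStep2]
      rw [ih]; simp [pvRender1]

theorem pvGet_of_op (t : Int) (ht : t ∈ pvOps) :
    PySem.Dict.get? pvSym t = some (pvOpStr t) := by
  fin_cases ht <;> decide

theorem pvGet_of_not_op (t : Int) (ht : t ∉ pvOps) :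
    PySem.Dict.get? pvSym t = none := by
  simp only [pvOps, List.mem_cons, List.not_mem_nil, or_false, not_or] at ht
  obtain ⟨h1, h2, h3, h4⟩ := ht
  have hi : pvSym.items = [(10, "/"), (11, "+"), (12, "-"), (13, "*")] := by decide
  have e1 : ((10 : Int) == t) = false := by simp [Ne.symm h1]
  have e2 : ((11 : Int) == t) = false := by simp [Ne.symm h2]
  have e3 : ((12 : Int) == t) = false := by simp [Ne.symm h3]
  have e4 : ((13 : Int) == t) = false := by simp [Ne.symm h4]
  simp [PySem.Dict.get?, hi, List.find?, e1, e2, e3, e4]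

theorem pvFold_inv (arr : List Int) (ms : List (List Int ⊕ Int)) (temp : List Int) :
    arr.foldl pvStepB (ms.map pvRender1, temp) =
      (((arr.foldl pvStep1 (ms, temp)).1.map pvRender1),
        (arr.foldl pvStep1 (ms, temp)).2) := by
  induction arr generalizing ms temp with
  | nil => simp
  | cons t arr ih =>
    by_cases ht : t ∈ pvOps
    · simp only [List.foldl_cons, pvStepB, pvStep1, if_pos ht, pvGet_of_op t ht]
      have := ih (ms ++ [Sum.inl temp, Sum.inr t]) []
      simpa [pvRender1] using this
    · simp only [List.foldl_cons, pvStepB, pvStep1, if_neg ht, pvGet_of_not_op t ht]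
      exact ih ms (temp ++ [t])

-- ===== VERDICT (by name: the statement is the Claim_ definition above) =====
theorem math_expression_generator_spec : Claim_equal_math_expression_generator := by
  intro arr _
  unfold Spec_math_expression_generator math_expression_generator math_expression_generator_alt
  have hinv := pvFold_inv arr [] []
  simp only [List.map_nil] at hinv
  rw [hinv]
  set s := arr.foldl pvStep1 ([], [])
  by_cases h2 : s.2 = []
  · simp only [h2, ne_eq, not_true_eq_false, if_false]
    rw [pvStep2_fold]
    simp
  · simp only [ne_eq, h2, not_false_eq_true, if_true]
    rw [show s.1 ++ [Sum.inl s.2] = (s.1 ++ [Sum.inl s.2]) from rfl, pvStep2_fold]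
    simp [pvRender1, pvNumStr, h2]
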